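-- pv_equiv track=rewrite | github.com/like-daffy/midi_drum_part_splitter | dev_resources/midi_reader.py | group_notes_by_markers
-- ===== SOURCE A (Python) =====
-- from collections import defaultdict
--
-- def midi_note_to_name(note_number):
--     """Convert MIDI note number to note name using Cubase octave numbering (e.g., 60 -> C3)"""
--     note_names = ['C', 'C#', 'D', 'D#', 'E', 'F', 'F#', 'G', 'G#', 'A', 'A#', 'B']
--     octave = (note_number // 12) - 2  # Cubase uses -2 instead of -1 for octave calculation
--     note = note_names[note_number % 12]
--     return f"{note}{octave}"
--
-- def group_notes_by_markers(markers, notes):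
--     """Group notes by their corresponding markers"""
--     if not markers:
--         return None
--
--     # Sort markers and notes by time
--     markers.sort(key=lambda x: x[0])
--     notes.sort(key=lambda x: x[0])
--
--     notes_by_marker = defaultdict(list)
--     marker_index = 0
--     current_marker = "Unknown"
--
--     for note_time, note_number in notes:
--         # Find the appropriate marker for this note
--         while (marker_index < len(markers) and
--                markers[marker_index][0] <= note_time):
--             current_marker = markers[marker_index][1]
--             marker_index += 1
--
--         note_name = midi_note_to_name(note_number)
--         notes_by_marker[current_marker].append(note_name)
--
--     return notes_by_marker
-- ===== SOURCE B (Python) =====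
-- def midi_note_to_name(note_number):
--     """Convert MIDI note number to note name using Cubase octave numbering (e.g., 60 -> C3)"""
--     note_names = ['C', 'C#', 'D', 'D#', 'E', 'F', 'F#', 'G', 'G#', 'A', 'A#', 'B']
--     octave = (note_number // 12) - 2
--     note = note_names[note_number % 12]
--     return f"{note}{octave}"
--
-- def group_notes_by_markers(markers, notes):
--     """Group notes by their corresponding markers (stateless per-note marker lookup).
--
--     Like the original, returns None on empty markers and sorts both inputs in place."""
--     if not markers:
--         return None
--     markers.sort(key=lambda x: x[0])
--     notes.sort(key=lambda x: x[0])
--     out = {}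
--     for note_time, note_number in notes:
--         k = sum(1 for m in markers if m[0] <= note_time)
--         name = markers[k - 1][1] if k > 0 else "Unknown"
--         out.setdefault(name, []).append(midi_note_to_name(note_number))
--     return out
-- ===== Notes on version B (the rewrite author's own statement) =====
-- stated objective: alternative
-- what changed: Replaces A's stateful two-pointer walk (marker_index and current_marker carried across the sorted notes, with an inner while loop) by a stateless per-note lookup: count the markers with time <= note_time and take the last of them, accumulating into a plain dict via setdefault.
import Mathlib
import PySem

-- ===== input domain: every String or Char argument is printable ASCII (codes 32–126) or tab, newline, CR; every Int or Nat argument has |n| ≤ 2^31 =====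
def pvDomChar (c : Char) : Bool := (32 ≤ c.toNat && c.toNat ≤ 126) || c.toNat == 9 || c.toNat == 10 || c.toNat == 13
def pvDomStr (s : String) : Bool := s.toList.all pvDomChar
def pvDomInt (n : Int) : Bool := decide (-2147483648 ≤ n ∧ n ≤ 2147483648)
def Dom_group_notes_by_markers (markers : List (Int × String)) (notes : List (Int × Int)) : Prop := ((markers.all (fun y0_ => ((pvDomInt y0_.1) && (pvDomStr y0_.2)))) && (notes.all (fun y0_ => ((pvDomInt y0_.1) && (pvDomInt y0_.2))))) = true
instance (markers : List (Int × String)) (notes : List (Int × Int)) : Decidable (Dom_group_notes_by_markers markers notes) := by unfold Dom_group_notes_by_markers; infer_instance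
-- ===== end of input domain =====

-- B replaces A's stateful two-pointer walk (marker_index/current_marker carried across notes)
-- by a stateless per-note count of markers not after the note; objective: alternative, same result.
-- Both A and B sort the two argument lists in place (a side effect); the equivalence proved here
-- is about the return value.


-- ===== PORT A =====
-- shared module helper midi_note_to_name (both Pythons carry a verbatim copy)
def midiNoteToName (noteNumber : Int) : String :=
  let noteNames : List String := ["C", "C#", "D", "D#", "E", "F", "F#", "G", "G#", "A", "A#", "B"]
  let octave : Int := PySem.Int.floordiv noteNumber 12 - 2
  -- note_names[note_number % 12]: the index is always in 0..11, so the default is never used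
  let note : String := PySem.List.pyGetD noteNames (PySem.Int.mod noteNumber 12) ""
  note ++ PySem.Int.toStr octave

-- A's inner 'while' loop: advance marker_index while markers[marker_index][0] <= note_time
def advanceA (ms : List (Int × String)) (t : Int) (i : Nat) (cur : String) : Nat × String :=
  if h : i < ms.length ∧ (ms.getD i (0, "")).1 ≤ t then
    advanceA ms t (i + 1) (ms.getD i (0, "")).2
  else (i, cur)
termination_by ms.length - i
decreasing_by omega

def group_notes_by_markers (markers : List (Int × String)) (notes : List (Int × Int)) : Option (List (String × List String)) :=
  if markers = [] then none
  else
    let ms := PySem.List.sorted markers (fun x => x.1)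
    let ns := PySem.List.sorted notes (fun x => x.1)
    let st := ns.foldl
      (fun (st : PySem.Dict String (List String) × Nat × String) p =>
        let r := advanceA ms p.1 st.2.1 st.2.2
        (PySem.Dict.modify st.1 r.2 [] (fun l => l ++ [midiNoteToName p.2]), r.1, r.2))
      (PySem.Dict.empty, 0, "Unknown")
    some st.1.items

-- ===== PORT B =====
def group_notes_by_markers_alt (markers : List (Int × String)) (notes : List (Int × Int)) : Option (List (String × List String)) :=
  if markers = [] then none
  else
    let ms := PySem.List.sorted markers (fun x => x.1)
    let ns := PySem.List.sorted notes (fun x => x.1)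
    let d := ns.foldl
      (fun (d : PySem.Dict String (List String)) p =>
        let k := (ms.filter (fun m => decide (m.1 ≤ p.1))).length
        -- markers[k-1] is in range whenever k > 0, so the default is never used
        let name := if k > 0 then (ms.getD (k - 1) (0, "")).2 else "Unknown"
        PySem.Dict.modify d name [] (fun l => l ++ [midiNoteToName p.2]))
      PySem.Dict.empty
    some d.items

-- ===== PRECONDITION & SPEC =====
def Spec_group_notes_by_markers (markers : List (Int × String)) (notes : List (Int × Int)) (out : Option (List (String × List String))) : Prop := out = group_notes_by_markers_alt markers notes
instance (markers : List (Int × String)) (notes : List (Int × Int)) (out : Option (List (String × List String))) : Decidable (Spec_group_notes_by_markers markers notes out) := by unfold Spec_group_notes_by_markers; infer_instance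

-- ===== CLAIM (what is proved, stated in full; the proofs are below) =====
def Claim_equal_group_notes_by_markers : Prop := ∀ (markers : List (Int × String)) (notes : List (Int × Int)), Dom_group_notes_by_markers markers notes → Spec_group_notes_by_markers markers notes (group_notes_by_markers markers notes)

-- ===== LEMMAS AND PROOFS =====

-- number of markers at or before time t (= B's per-note count)
def pvCnt (ms : List (Int × String)) (t : Int) : Nat :=
  (ms.filter (fun m => decide (m.1 ≤ t))).length

-- B's per-note marker name for a count k
def pvNm (ms : List (Int × String)) (k : Nat) : String :=
  if k > 0 then (ms.getD (k - 1) (0, "")).2 else "Unknown"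

lemma pvCnt_le_length (ms : List (Int × String)) (t : Int) : pvCnt ms t ≤ ms.length :=
  List.length_filter_le _ _

lemma pvCnt_tail_zero {a : Int × String} {l : List (Int × String)} {t : Int}
    (ha : ¬ a.1 ≤ t) (hord : ∀ b ∈ l, a.1 ≤ b.1) : pvCnt l t = 0 := by
  unfold pvCnt
  rw [List.length_eq_zero_iff, List.filter_eq_nil_iff]
  intro b hb
  simp only [decide_eq_true_eq]
  exact fun hbt => ha (le_trans (hord b hb) hbt)

lemma pvCnt_lt_le {ms : List (Int × String)} {t : Int}
    (hms : ms.Pairwise (fun a b => a.1 ≤ b.1)) :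
    ∀ i < pvCnt ms t, (ms.getD i (0, "")).1 ≤ t := by
  induction ms with
  | nil => simp [pvCnt]
  | cons a l ih =>
    rcases List.pairwise_cons.mp hms with ⟨hord, hl⟩
    intro i hi
    by_cases ha : a.1 ≤ t
    · cases i with
      | zero => simpa using ha
      | succ j =>
        have : pvCnt (a :: l) t = pvCnt l t + 1 := by
          simp [pvCnt, ha]
        simp only [List.getD_cons_succ]
        exact ih hl j (by omega)
    · rw [show pvCnt (a :: l) t = pvCnt l t by simp [pvCnt, ha],
        pvCnt_tail_zero ha hord] at hi
      omega

lemma pvCnt_stop {ms : List (Int × String)} {t : Int}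
    (hms : ms.Pairwise (fun a b => a.1 ≤ b.1)) (h : pvCnt ms t < ms.length) :
    ¬ (ms.getD (pvCnt ms t) (0, "")).1 ≤ t := by
  induction ms with
  | nil => simp at h
  | cons a l ih =>
    rcases List.pairwise_cons.mp hms with ⟨hord, hl⟩
    by_cases ha : a.1 ≤ t
    · have he : pvCnt (a :: l) t = pvCnt l t + 1 := by
        simp [pvCnt, ha]
      rw [he] at h ⊢
      simp only [List.getD_cons_succ]
      exact ih hl (by simpa using h)
    · rw [show pvCnt (a :: l) t = pvCnt l t by simp [pvCnt, ha],
        pvCnt_tail_zero ha hord]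
      simpa using ha

lemma pvCnt_mono (ms : List (Int × String)) {t t' : Int} (h : t ≤ t') :
    pvCnt ms t ≤ pvCnt ms t' := by
  induction ms with
  | nil => simp [pvCnt]
  | cons a l ih =>
    by_cases ha : a.1 ≤ t
    · simp [pvCnt, ha, le_trans ha h] at ih ⊢
      omega
    · by_cases ha' : a.1 ≤ t' <;>
        simp [pvCnt, ha, ha'] at ih ⊢ <;> omega

lemma advanceA_correct {ms : List (Int × String)} (t : Int)
    (hms : ms.Pairwise (fun a b => a.1 ≤ b.1)) :
    ∀ n i cur, pvCnt ms t - i = n → i ≤ pvCnt ms t → cur = pvNm ms i →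
      advanceA ms t i cur = (pvCnt ms t, pvNm ms (pvCnt ms t)) := by
  intro n
  induction n with
  | zero =>
    intro i cur hn hi hcur
    have hieq : i = pvCnt ms t := by omega
    rw [advanceA]
    have : ¬ (i < ms.length ∧ (ms.getD i (0, "")).1 ≤ t) := by
      rintro ⟨h1, h2⟩
      exact pvCnt_stop hms (hieq ▸ h1) (hieq ▸ h2)
    simp only [this, dite_false]
    rw [hcur, hieq]
  | succ n ih =>
    intro i cur hn hi hcur
    have hlt : i < pvCnt ms t := by omega
    have hlen : i < ms.length := lt_of_lt_of_le hlt (pvCnt_le_length ms t)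
    have hle : (ms.getD i (0, "")).1 ≤ t := pvCnt_lt_le hms i hlt
    rw [advanceA]
    simp only [hlen, hle, and_self, dite_true]
    exact ih (i + 1) _ (by omega) (by omega) (by simp [pvNm])

-- the loop bodies of the two ports, over a fixed sorted marker list
def pvStepA (ms : List (Int × String))
    (st : PySem.Dict String (List String) × Nat × String) (p : Int × Int) :
    PySem.Dict String (List String) × Nat × String :=
  let r := advanceA ms p.1 st.2.1 st.2.2
  (PySem.Dict.modify st.1 r.2 [] (fun l => l ++ [midiNoteToName p.2]), r.1, r.2)

def pvStepB (ms : List (Int × String))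
    (d : PySem.Dict String (List String)) (p : Int × Int) :
    PySem.Dict String (List String) :=
  let k := (ms.filter (fun m => decide (m.1 ≤ p.1))).length
  let name := if k > 0 then (ms.getD (k - 1) (0, "")).2 else "Unknown"
  PySem.Dict.modify d name [] (fun l => l ++ [midiNoteToName p.2])

lemma pvFold_eq {ms : List (Int × String)} (hms : ms.Pairwise (fun a b => a.1 ≤ b.1)) :
    ∀ (ns : List (Int × Int)) (d : PySem.Dict String (List String)) (i : Nat) (cur : String),
      ns.Pairwise (fun a b => a.1 ≤ b.1) →
      (∀ p ∈ ns, i ≤ pvCnt ms p.1) → cur = pvNm ms i →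
      (ns.foldl (pvStepA ms) (d, i, cur)).1 = ns.foldl (pvStepB ms) d := by
  intro ns
  induction ns with
  | nil => intro d i cur _ _ _; rfl
  | cons p l ih =>
    intro d i cur hsort hbound hcur
    rcases List.pairwise_cons.mp hsort with ⟨hord, hl⟩
    have hadv : advanceA ms p.1 i cur = (pvCnt ms p.1, pvNm ms (pvCnt ms p.1)) :=
      advanceA_correct p.1 hms _ i cur rfl (hbound p (by simp)) hcur
    simp only [List.foldl_cons]
    have hstep : pvStepA ms (d, i, cur) p =
        (pvStepB ms d p, pvCnt ms p.1, pvNm ms (pvCnt ms p.1)) := by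
      simp only [pvStepA, pvStepB, hadv, pvCnt, pvNm]
    rw [hstep]
    exact ih _ _ _ hl
      (fun q hq => le_trans (pvCnt_mono ms (hord q hq)) (le_refl _))
      rfl

-- ===== VERDICT (by name: the statement is the Claim_ definition above) =====
theorem group_notes_by_markers_spec : Claim_equal_group_notes_by_markers := by
  intro markers notes _
  unfold Spec_group_notes_by_markers group_notes_by_markers group_notes_by_markers_alt
  by_cases hmk : markers = []
  · simp [hmk]
  · simp only [hmk, if_false]
    have hms := PySem.List.sorted_pairwise markers (fun x => x.1)
    have hns := PySem.List.sorted_pairwise notes (fun x => x.1)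
    have := pvFold_eq hms (PySem.List.sorted notes (fun x => x.1))
      PySem.Dict.empty 0 "Unknown" hns (fun p _ => Nat.zero_le _) (by simp [pvNm])
    exact congrArg (fun d => some (PySem.Dict.items d)) this
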